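-- pv_equiv track=rewrite | github.com/spacetime-timespace/terrainworld | terrain2d.py | devert64
-- ===== SOURCE A (Python) =====
-- def devert64(string):
--     if string[0]=="-":
--         s=string[1:]
--     else:
--         s=string
--     v=0
--     for i in s:
--         v*=64
--         try:
--             v+=list(string).index(i)
--         except ValueError:
--             v+=0
--     if string[0]=="-":
--         v*=-1
--     return v
-- ===== SOURCE B (Python) =====
-- def devert64(string):
--     neg = string.startswith("-")
--     s = string[1:] if neg else string
--     v = 0
--     mult = 1
--     for ch in reversed(s):
--         try:
--             v += string.index(ch) * mult
--         except ValueError: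
--             pass
--         mult *= 64
--     return -v if neg else v
-- ===== Notes on version B (the rewrite author's own statement) =====
-- stated objective: faster
-- what changed: Replaces A's left-to-right Horner accumulation (v = v*64 + digit) with a reversed, least-significant-digit-first pass maintaining an explicit running power-of-64 multiplier, looking digits up with str.index instead of rebuilding list(string) and scanning it on every iteration.
import Mathlib
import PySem

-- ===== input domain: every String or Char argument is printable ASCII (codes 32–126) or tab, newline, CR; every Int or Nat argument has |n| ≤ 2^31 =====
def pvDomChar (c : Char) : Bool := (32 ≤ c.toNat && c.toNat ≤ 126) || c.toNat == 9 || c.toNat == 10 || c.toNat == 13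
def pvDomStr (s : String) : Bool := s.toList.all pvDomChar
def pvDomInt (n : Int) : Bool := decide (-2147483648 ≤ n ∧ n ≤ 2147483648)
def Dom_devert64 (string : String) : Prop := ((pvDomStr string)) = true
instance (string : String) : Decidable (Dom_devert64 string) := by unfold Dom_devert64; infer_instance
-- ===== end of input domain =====

-- B evaluates the base-64 digits least-significant first with a running multiplier,
-- instead of A's left-to-right Horner accumulation. Return values only are compared.

-- digit value of character c: first-occurrence index in the FULL string, 0 if absent
-- (shared helper: both Pythons do exactly this lookup via .index with except ValueError -> +0)
def pvDigit (string : String) (c : Char) : Int :=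
  match PySem.List.index? string.toList c with
  | some k => (k : Int)
  | none => 0

-- ===== PORT A =====
def devert64 (string : String) : Int :=
  let s : List Char :=
    if PySem.Str.pyGet? string 0 = some '-' then (PySem.Str.slice string (some 1) none).toList
    else string.toList
  let v : Int := s.foldl (fun v c => v * 64 + pvDigit string c) 0
  if PySem.Str.pyGet? string 0 = some '-' then v * (-1) else v

-- ===== PORT B =====
def devert64_alt (string : String) : Int :=
  let neg := PySem.Str.startswith string "-"
  let s : List Char :=
    if neg then (PySem.Str.slice string (some 1) none).toList else string.toList
  let p : Int × Int :=
    s.reverse.foldl (fun (p : Int × Int) c => (p.1 + pvDigit string c * p.2, p.2 * 64)) (0, 1)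
  if neg then -p.1 else p.1

-- ===== PRECONDITION & SPEC =====
-- Pre_ excludes only the empty string, on which A raises IndexError at string[0].
def Pre_devert64 (string : String) : Prop := string ≠ ""
instance (string : String) : Decidable (Pre_devert64 string) := by unfold Pre_devert64; infer_instance
def pvWitness_devert64 : String := "-aB3"

def Spec_devert64 (string : String) (out : Int) : Prop := out = devert64_alt string
instance (string : String) (out : Int) : Decidable (Spec_devert64 string out) := by unfold Spec_devert64; infer_instance

-- ===== CLAIM (what is proved, stated in full; the proofs are below) =====
def Claim_equal_devert64 : Prop := ∀ (string : String), Dom_devert64 string → Pre_devert64 string → Spec_devert64 string (devert64 string)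

-- ===== LEMMAS AND PROOFS =====

-- Horner fold over l ++ [c] peels the last digit
theorem horner_append (f : Char → Int) (l : List Char) (c : Char) :
    (l ++ [c]).foldl (fun v c => v * 64 + f c) 0
      = (l.foldl (fun v c => v * 64 + f c) 0) * 64 + f c := by
  simp [List.foldl_append]

-- B's reversed fold with running multiplier computes the Horner value of the reversed list
theorem revmult_eq_horner (f : Char → Int) :
    ∀ (l : List Char) (v m : Int),
      l.foldl (fun (p : Int × Int) c => (p.1 + f c * p.2, p.2 * 64)) (v, m)
        = (v + m * (l.reverse.foldl (fun a c => a * 64 + f c) 0), m * 64 ^ l.length) := by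
  intro l
  induction l with
  | nil => intro v m; simp
  | cons c t ih =>
      intro v m
      simp only [List.foldl_cons, ih, List.reverse_cons, horner_append, List.length_cons]
      rw [Prod.mk.injEq]; constructor <;> ring

-- B's fold, in foldr form after reversal, computes A's Horner value
theorem fst_foldr (f : Char → Int) (l : List Char) :
    (List.foldr (fun x (y : Int × Int) => (y.1 + f x * y.2, y.2 * 64)) ((0:Int), (1:Int)) l).1
      = l.foldl (fun v c => v * 64 + f c) 0 := by
  rw [← List.foldl_reverse, revmult_eq_horner]
  simp

-- the two sign tests agree on every char list
theorem cond_eq (l : List Char) :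
    (PySem.List.pyGet? l 0 = some '-') ↔ (PySem.Chars.startswith l ['-'] = true) := by
  rw [PySem.Chars.startswith_iff]
  cases l with
  | nil => simp [PySem.List.pyGet?]
  | cons a t =>
      rw [List.cons_prefix_cons]
      simp [PySem.List.pyGet?, PySem.List.pyIdx?, eq_comm]

-- ===== VERDICT (by name: the statement is the Claim_ definition above) =====
theorem devert64_spec : Claim_equal_devert64 := by
  intro string _ _
  unfold Spec_devert64 devert64 devert64_alt
  by_cases h : PySem.List.pyGet? string.toList 0 = some '-'
  · have hb : PySem.Chars.startswith string.toList ['-'] = true := (cond_eq _).mp h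
    simp [h, hb, fst_foldr]
  · have hb : PySem.Chars.startswith string.toList ['-'] = false := by
      rcases Bool.eq_false_or_eq_true (PySem.Chars.startswith string.toList ['-']) with hf | ht
      · exact absurd ((cond_eq _).mpr hf) h
      · exact ht
    simp [h, hb, fst_foldr]
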